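-- pv_equiv track=rewrite | github.com/tendeuse/Cryonic-Gaming-Bot | cogs/server_setup.py | _valid_channel
-- ===== SOURCE A (Python) =====
-- from typing import Any
--
-- def _valid_channel(v: Any) -> bool:
--     """True only for strings that look like real Discord channel names."""
--     if not isinstance(v, str) or not v or len(v) > 100:
--         return False
--     # Channel names must not contain spaces, slashes, or colons
--     if ' ' in v or '/' in v or ':' in v:
--         return False
--     if v.startswith('http') or '{' in v:
--         return False
--     return any(c.isalpha() for c in v)
-- ===== SOURCE B (Python) =====
-- def _valid_channel(v) -> bool:
--     """True only for strings that look like real Discord channel names.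
--
--     Table/arithmetic formulation: each character is classified with a numeric
--     severity (2 = forbidden, 1 = letter, 0 = neutral); the name is valid iff
--     the guards pass and the maximum severity over the string is exactly 1
--     (no forbidden character, at least one letter).
--     """
--     if not isinstance(v, str) or not (0 < len(v) <= 100) or v.startswith('http'):
--         return False
--     return max(2 if c in ' /:{' else 1 if c.isalpha() else 0 for c in v) == 1
-- ===== Notes on version B (the rewrite author's own statement) =====
-- stated objective: alternative
-- what changed: Replaced A's chain of boolean substring scans plus any(isalpha) with an arithmetic formulation: each character maps to a numeric severity (2 forbidden, 1 letter, 0 neutral) and validity is max severity == 1.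
import Mathlib
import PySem

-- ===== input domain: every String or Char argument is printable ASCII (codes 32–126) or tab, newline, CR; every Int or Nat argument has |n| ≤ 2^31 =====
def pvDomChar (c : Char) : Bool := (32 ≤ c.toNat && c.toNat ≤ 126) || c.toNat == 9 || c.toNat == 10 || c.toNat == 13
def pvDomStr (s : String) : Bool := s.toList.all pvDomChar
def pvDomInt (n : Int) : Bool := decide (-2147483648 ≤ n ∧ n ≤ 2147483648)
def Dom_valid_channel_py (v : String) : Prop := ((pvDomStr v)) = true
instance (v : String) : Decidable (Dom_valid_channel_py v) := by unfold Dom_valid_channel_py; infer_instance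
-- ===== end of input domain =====

-- B replaces A's chain of boolean scans (three substring tests, '{' test, any(isalpha))
-- by an arithmetic formulation: per-character numeric severity, valid iff max severity = 1
-- (objective: alternative).


-- ===== PORT A =====
-- literal transliteration of _valid_channel (v is a String, so the isinstance test is True)
def valid_channel_py (v : String) : Bool :=
  if v.toList = [] || decide (100 < PySem.Str.len v) then false
  else if PySem.Str.isIn " " v || PySem.Str.isIn "/" v || PySem.Str.isIn ":" v then false
  else if PySem.Str.startswith v "http" || PySem.Str.isIn "{" v then false
  else v.toList.any (fun c => PySem.Chars.isalpha c)

-- ===== PORT B =====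
-- per-character severity: 2 = forbidden, 1 = letter, 0 = neutral (Source B's conditional expression)
def pvClass (c : Char) : Nat :=
  if c == ' ' || c == '/' || c == ':' || c == '{' then 2
  else if PySem.Chars.isalpha c then 1 else 0

-- Source B: guards, then max of the severities == 1.  Python's max over the (nonempty, by the
-- guard) generator is ported as foldl Nat.max 0, exact here since all severities are ≥ 0.
def valid_channel_py_alt (v : String) : Bool :=
  if !(decide (0 < PySem.Str.len v) && decide (PySem.Str.len v ≤ 100))
     || PySem.Str.startswith v "http" then false
  else decide ((v.toList.map pvClass).foldl Nat.max 0 = 1)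

-- ===== PRECONDITION & SPEC =====
def Spec_valid_channel_py (v : String) (out : Bool) : Prop := out = valid_channel_py_alt v
instance (v : String) (out : Bool) : Decidable (Spec_valid_channel_py v out) := by unfold Spec_valid_channel_py; infer_instance

-- ===== CLAIM =====
def Claim_equal_valid_channel_py : Prop := ∀ (v : String), Dom_valid_channel_py v → Spec_valid_channel_py v (valid_channel_py v)

-- ===== LEMMAS AND PROOFS =====

-- 'c in s' for a single character is list membership
lemma isIn_single_char (c : Char) (l : List Char) :
    PySem.Chars.isIn [c] l = l.contains c := by
  rw [Bool.eq_iff_iff, PySem.Chars.isIn_iff_infix, List.singleton_infix_iff]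
  simp

-- foldl Nat.max over any seed splits off the seed
lemma foldl_max_seed (l : List Nat) (m : Nat) :
    l.foldl Nat.max m = Nat.max m (l.foldl Nat.max 0) := by
  induction l generalizing m with
  | nil => simp
  | cons a l ih =>
    simp only [List.foldl_cons]
    rw [ih (Nat.max m a), ih (Nat.max 0 a)]
    simp only [Nat.max_def]
    split_ifs <;> omega

-- the max severity, characterised: 2 iff a forbidden char occurs, else 1 iff a letter occurs
set_option maxHeartbeats 1000000 in
lemma maxClass_spec (cs : List Char) :
    (cs.map pvClass).foldl Nat.max 0 =
      if cs.contains ' ' || cs.contains '/' || cs.contains ':' || cs.contains '{'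
      then 2 else if cs.any (fun c => PySem.Chars.isalpha c) then 1 else 0 := by
  induction cs with
  | nil => simp
  | cons c cs ih =>
    simp only [List.map_cons, List.foldl_cons, List.contains_cons, List.any_cons]
    rw [foldl_max_seed, ih]
    have hcls : Nat.max 0 (pvClass c) ≤ 2 := by
      unfold pvClass; split_ifs <;> simp
    by_cases hF : (cs.contains ' ' || cs.contains '/' || cs.contains ':' || cs.contains '{') = true
    · rw [if_pos hF]
      rw [if_pos (by simp only [Bool.or_eq_true, beq_iff_eq, @eq_comm Char] at hF ⊢; tauto)]
      exact max_eq_right hcls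
    · rw [if_neg hF]
      by_cases hc : (c == ' ' || c == '/' || c == ':' || c == '{') = true
      · have h2 : pvClass c = 2 := by unfold pvClass; rw [if_pos hc]
        by_cases hA : (cs.any fun c => PySem.Chars.isalpha c) = true
        · rw [if_pos hA, h2,
              if_pos (by simp only [Bool.or_eq_true, beq_iff_eq, @eq_comm Char] at hc ⊢; tauto)]
          rfl
        · rw [if_neg hA, h2,
              if_pos (by simp only [Bool.or_eq_true, beq_iff_eq, @eq_comm Char] at hc ⊢; tauto)]
          rfl
      · have h2 : pvClass c = if PySem.Chars.isalpha c = true then 1 else 0 := by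
          unfold pvClass; rw [if_neg hc]
        by_cases h5 : PySem.Chars.isalpha c = true <;>
          by_cases hA : (cs.any fun c => PySem.Chars.isalpha c) = true
        · rw [if_pos hA,
              if_neg (by simp only [Bool.or_eq_true, beq_iff_eq, @eq_comm Char, not_or] at hF hc ⊢; tauto)]
          simp [h2, h5, hA]
        · rw [if_neg hA,
              if_neg (by simp only [Bool.or_eq_true, beq_iff_eq, @eq_comm Char, not_or] at hF hc ⊢; tauto)]
          simp [h2, h5, hA]
        · rw [if_pos hA,
              if_neg (by simp only [Bool.or_eq_true, beq_iff_eq, @eq_comm Char, not_or] at hF hc ⊢; tauto)]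
          simp [h2, h5, hA]
        · rw [if_neg hA,
              if_neg (by simp only [Bool.or_eq_true, beq_iff_eq, @eq_comm Char, not_or] at hF hc ⊢; tauto)]
          simp [h2, h5, hA]

-- ===== VERDICT =====
theorem valid_channel_py_spec : Claim_equal_valid_channel_py := by
  intro v _
  unfold Spec_valid_channel_py valid_channel_py valid_channel_py_alt
  have hlen : PySem.Str.len v = (v.toList.length : Int) := PySem.Str.len_eq v
  have hVL : v.toList.length = v.length := by simp
  by_cases hemp : v.toList = []
  · have h0 : v.toList.length = 0 := by simp [hemp]
    simp [hemp, hlen, h0]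
  · by_cases hlong : (100:Int) < (v.toList.length : Int)
    · have h2 : ¬((v.toList.length : Int) ≤ 100) := by omega
      have h3 : 100 < v.length := by omega
      simp [hlen, hemp, h3, Nat.not_lt.mp, h2, hlong]
    · have hle : (v.toList.length : Int) ≤ 100 := by omega
      have hpos : (0:Int) < (v.toList.length : Int) := by
        have : v.toList.length ≠ 0 := by simpa [List.eq_nil_iff_length_eq_zero] using hemp
        omega
      rw [if_neg (by simp [hlen, hemp]; omega)]
      rw [show (!(decide (0 < PySem.Str.len v) && decide (PySem.Str.len v ≤ 100))) = false by
        simp [hlen]; omega]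
      simp only [Bool.false_or]
      rw [show PySem.Str.isIn " " v = v.toList.contains ' ' from isIn_single_char ' ' v.toList,
          show PySem.Str.isIn "/" v = v.toList.contains '/' from isIn_single_char '/' v.toList,
          show PySem.Str.isIn ":" v = v.toList.contains ':' from isIn_single_char ':' v.toList,
          show PySem.Str.isIn "{" v = v.toList.contains '{' from isIn_single_char '{' v.toList,
          maxClass_spec]
      by_cases hH : PySem.Str.startswith v "http" = true
      · rw [hH]; simp
      · simp only [Bool.not_eq_true] at hH
        rw [hH]
        cases h1 : v.toList.contains ' ' <;> cases h2 : v.toList.contains '/' <;>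
          cases h3 : v.toList.contains ':' <;> cases h4 : v.toList.contains '{' <;>
          simp_all <;> cases h5 : v.toList.any (fun c => PySem.Chars.isalpha c) <;> simp_all
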